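-- pv_equiv track=rewrite | github.com/mathorlee/leetcode-clt | ac/minimum-operations-to-make-a-subsequence.py | calculate_cuts
-- ===== SOURCE A (Python) =====
-- def calculate_cuts(target: list[int], arr: list[int]) -> int:
--     # begin
--     from bisect import bisect_left
--
--     index_d = {v: i for i, v in enumerate(target)}
--
--     # solution 1: TLE
--     # res = [0] * len(target)
--     # for v in arr:
--     #     if v in index_d:
--     #         index = index_d[v]
--     #         if index > 0:
--     #             res[index] = max(res[:index]) + 1
--     #         else:
--     #             res[index] = 1
--     # return len(target) - max(res)
--
--     # solution 2:
--     res = []  # res[i] = min(v if subsequence length = i + 1 and subsequence end with target[v])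
--     for v in arr:
--         if v in index_d:
--             index = index_d[v]
--             i = bisect_left(res, index)
--             if i < len(res):
--                 res[i] = min(res[i], index)
--             else:
--                 res.append(index)
--     return len(target) - len(res)
-- ===== SOURCE B (Python) =====
-- def calculate_cuts(target: list[int], arr: list[int]) -> int:
--     # Same index mapping, then the quadratic DP for the longest strictly
--     # increasing subsequence of the index sequence instead of patience/bisect.
--     index_d = {v: i for i, v in enumerate(target)}
--     seq = [index_d[v] for v in arr if v in index_d]
--     dp = []  # (index value, length of longest strictly increasing run ending here)
--     for x in seq:
--         best = 0
--         for (y, l) in dp: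
--             if y < x and l > best:
--                 best = l
--         dp.append((x, best + 1))
--     ans = 0
--     for (_, l) in dp:
--         if l > ans:
--             ans = l
--     return len(target) - ans
-- ===== Notes on version B (the rewrite author's own statement) =====
-- stated objective: alternative
-- what changed: Replaces the patience-sorting tails array with bisect_left by the classic quadratic DP that stores, for each mapped element, the length of the longest strictly increasing run ending there, and returns len(target) minus the overall maximum.
import Mathlib
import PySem

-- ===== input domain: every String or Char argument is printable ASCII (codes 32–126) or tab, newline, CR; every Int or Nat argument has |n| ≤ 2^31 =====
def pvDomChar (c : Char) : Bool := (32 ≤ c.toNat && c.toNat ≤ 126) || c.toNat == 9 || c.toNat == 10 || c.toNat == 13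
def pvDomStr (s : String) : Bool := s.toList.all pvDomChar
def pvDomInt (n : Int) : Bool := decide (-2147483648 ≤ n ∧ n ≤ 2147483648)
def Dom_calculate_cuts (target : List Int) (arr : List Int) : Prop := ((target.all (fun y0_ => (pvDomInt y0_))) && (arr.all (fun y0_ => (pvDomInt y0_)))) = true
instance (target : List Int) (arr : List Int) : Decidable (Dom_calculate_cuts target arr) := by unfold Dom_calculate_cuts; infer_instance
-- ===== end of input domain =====

-- B replaces A's patience/bisect tails array by the quadratic longest-increasing-run DP
-- over the same index sequence (alternative decomposition, not faster).


-- ===== PORT A =====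
-- index_d = {v: i for i, v in enumerate(target)}  (last occurrence wins, like Python dict overwrite)
def pvIndexD (target : List Int) : PySem.Dict Int Int :=
  (PySem.List.enumerate target).foldl (fun d p => d.insert p.2 p.1) PySem.Dict.empty

-- body of A's loop once 'v in index_d' succeeded; bisect_left is PySem.List.bisectLeft
def pvPatCore (res : List Int) (index : Int) : List Int :=
  let i := PySem.List.bisectLeft res index
  if i < res.length then res.set i (min (res.getD i 0) index)
  else res ++ [index]

-- one iteration of A's 'for v in arr' loop ('if v in index_d: index = index_d[v]; ...')
def pvPatStep (d : PySem.Dict Int Int) (res : List Int) (v : Int) : List Int :=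
  match d.get? v with
  | none => res
  | some index => pvPatCore res index

def calculate_cuts (target : List Int) (arr : List Int) : Int :=
  let index_d := pvIndexD target
  let res := arr.foldl (pvPatStep index_d) []
  (target.length : Int) - (res.length : Int)

-- ===== PORT B =====
-- inner loop: best = max length among dp entries with smaller index value
def pvBest (dp : List (Int × Int)) (x : Int) : Int :=
  dp.foldl (fun best p => if p.1 < x ∧ p.2 > best then p.2 else best) 0

-- one iteration of B's 'for x in seq' loop
def pvDpStep (dp : List (Int × Int)) (x : Int) : List (Int × Int) :=
  dp ++ [(x, pvBest dp x + 1)]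

-- final loop: ans = overall maximum length (0 if dp empty)
def pvAns (dp : List (Int × Int)) : Int :=
  dp.foldl (fun a p => if p.2 > a then p.2 else a) 0

def calculate_cuts_alt (target : List Int) (arr : List Int) : Int :=
  let index_d := pvIndexD target
  let seq := arr.filterMap (fun v => index_d.get? v)
  let dp := seq.foldl pvDpStep []
  (target.length : Int) - pvAns dp

-- ===== PRECONDITION & SPEC =====
def Spec_calculate_cuts (target : List Int) (arr : List Int) (out : Int) : Prop := out = calculate_cuts_alt target arr
instance (target : List Int) (arr : List Int) (out : Int) : Decidable (Spec_calculate_cuts target arr out) := by unfold Spec_calculate_cuts; infer_instance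

-- ===== CLAIM (what is proved, stated in full; the proofs are below) =====
def Claim_equal_calculate_cuts : Prop := ∀ (target : List Int) (arr : List Int), Dom_calculate_cuts target arr → Spec_calculate_cuts target arr (calculate_cuts target arr)

-- ===== LEMMAS AND PROOFS =====

-- number of elements of res that are < y
def pvCnt (res : List Int) (y : Int) : Nat := (res.filter (fun a => a < y)).length

-- invariant tying A's tails array to B's dp list
def pvInv (res : List Int) (dp : List (Int × Int)) : Prop :=
  res.Pairwise (· < ·) ∧ (∀ y, (pvCnt res y : Int) = pvBest dp y) ∧ ((res.length : Int) = pvAns dp)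

lemma pvCnt_append (p s : List Int) (y : Int) : pvCnt (p ++ s) y = pvCnt p y + pvCnt s y := by
  simp [pvCnt, List.filter_append]

lemma pvCnt_cons (z : Int) (s : List Int) (y : Int) :
    pvCnt (z :: s) y = (if z < y then 1 else 0) + pvCnt s y := by
  by_cases h : z < y <;> simp [pvCnt, List.filter_cons, h, Nat.add_comm]

lemma pvCnt_eq_zero (res : List Int) (y : Int) (h : ∀ a ∈ res, y ≤ a) : pvCnt res y = 0 := by
  simp only [pvCnt, List.length_eq_zero_iff, List.filter_eq_nil_iff]
  intro a ha
  simpa using not_lt.mpr (h a ha)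

lemma pvCnt_eq_len (res : List Int) (y : Int) (h : ∀ a ∈ res, a < y) : pvCnt res y = res.length := by
  unfold pvCnt
  rw [List.filter_eq_self.mpr]
  intro a ha; simpa using h a ha

lemma pvBest_append (dp : List (Int × Int)) (z n y : Int) :
    pvBest (dp ++ [(z, n)]) y = if z < y ∧ n > pvBest dp y then n else pvBest dp y := by
  simp [pvBest, List.foldl_append]

lemma pvAns_append (dp : List (Int × Int)) (z n : Int) :
    pvAns (dp ++ [(z, n)]) = if n > pvAns dp then n else pvAns dp := by
  simp [pvAns, List.foldl_append]

lemma pvSet (l : List Int) (n : Nat) (a : Int) (h : n < l.length) :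
    l.set n a = l.take n ++ a :: l.drop (n + 1) := by
  induction l generalizing n with
  | nil => simp at h
  | cons b t ih =>
    cases n with
    | zero => simp
    | succ m => simp [ih m (by simpa using h)]

lemma pvStep (res : List Int) (dp : List (Int × Int)) (x : Int) (h : pvInv res dp) :
    pvInv (pvPatCore res x) (pvDpStep dp x) := by
  obtain ⟨hsort, hb, hc⟩ := h
  obtain ⟨hile, hbelow, habove⟩ :=
    PySem.List.bisectLeft_spec res x (hsort.imp (fun hab => le_of_lt hab))
  set i := PySem.List.bisectLeft res x with hi
  have hmemtake : ∀ a ∈ res.take i, a < x := by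
    intro a ha
    rw [List.mem_iff_getElem] at ha
    obtain ⟨j, hj, rfl⟩ := ha
    have hj1 : j < i := lt_of_lt_of_le hj (by rw [List.length_take]; omega)
    have hj' : j < res.length := lt_of_lt_of_le hj (by rw [List.length_take]; omega)
    rw [List.getElem_take]
    exact hbelow j hj' hj1
  have hmemdrop : ∀ a ∈ res.drop i, x ≤ a := by
    intro a ha
    rw [List.mem_iff_getElem] at ha
    obtain ⟨j, hj, rfl⟩ := ha
    have hj' : i + j < res.length := by rw [List.length_drop] at hj; omega
    rw [List.getElem_drop]
    exact habove (i + j) hj' (Nat.le_add_right _ _)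
  have hPlen : (res.take i).length = i := by simp [List.length_take, Nat.min_eq_left hile]
  have hcx : pvCnt res x = i := by
    conv_lhs => rw [← List.take_append_drop i res]
    rw [pvCnt_append, pvCnt_eq_len _ _ hmemtake, pvCnt_eq_zero _ _ hmemdrop, hPlen]
    omega
  unfold pvPatCore pvDpStep
  rw [← hi]
  by_cases hlt : i < res.length
  · -- replacement case: res' = take i ++ x :: drop (i+1)
    have hxo : x ≤ res[i] := habove i hlt le_rfl
    have hgetD : res.getD i 0 = res[i] := by
      rw [List.getD_eq_getElem?_getD, List.getElem?_eq_getElem hlt]; rfl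
    have hmin : min (res.getD i 0) x = x := by rw [hgetD]; exact min_eq_right hxo
    rw [if_pos hlt, hmin, pvSet res i x hlt]
    have hres : res = res.take i ++ res[i] :: res.drop (i + 1) := by
      conv_lhs => rw [← List.take_append_drop i res, List.drop_eq_getElem_cons hlt]
    have hps : (res.take i ++ res[i] :: res.drop (i + 1)).Pairwise (· < ·) := by
      rw [← hres]; exact hsort
    rw [List.pairwise_append] at hps
    obtain ⟨hp, hos, hcross⟩ := hps
    rw [List.pairwise_cons] at hos
    obtain ⟨hOS, hS⟩ := hos
    refine ⟨?_, ?_, ?_⟩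
    · rw [List.pairwise_append]
      refine ⟨hp, ?_, ?_⟩
      · rw [List.pairwise_cons]
        exact ⟨fun b hb => lt_of_le_of_lt hxo (hOS b hb), hS⟩
      · intro a ha b hb
        rcases List.mem_cons.mp hb with rfl | hb
        · exact hmemtake a ha
        · exact hcross a ha b (List.mem_cons_of_mem _ hb)
    · intro y
      have ecur : pvCnt res y
          = pvCnt (res.take i) y + ((if res[i] < y then 1 else 0) + pvCnt (res.drop (i + 1)) y) := by
        conv_lhs => rw [hres]
        rw [pvCnt_append, pvCnt_cons]
      have hbx : pvBest dp x = (i : Int) := by rw [← hb x, hcx]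
      have hby : pvBest dp y = (pvCnt res y : Int) := (hb y).symm
      rw [pvCnt_append, pvCnt_cons, pvBest_append, hbx, hby, ecur]
      by_cases hxy : x < y
      · have hPy : pvCnt (res.take i) y = i := by
          rw [pvCnt_eq_len _ _ (fun a ha => lt_trans (hmemtake a ha) hxy), hPlen]
        by_cases hOy : res[i] < y
        · simp only [if_pos hxy, if_pos hOy, hPy]
          split_ifs with hcond <;> push_cast <;> push_cast at hcond <;> omega
        · have hSy : pvCnt (res.drop (i + 1)) y = 0 :=
            pvCnt_eq_zero _ _ (fun b hb' =>
              le_of_lt (lt_of_le_of_lt (le_of_not_gt hOy) (hOS b hb')))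
          simp only [if_pos hxy, if_neg hOy, hPy, hSy]
          split_ifs with hcond
          · push_cast; omega
          · exfalso; apply hcond; refine ⟨hxy, ?_⟩; push_cast; omega
      · have hOy : ¬ res[i] < y := fun hcon => hxy (lt_of_le_of_lt hxo hcon)
        simp only [if_neg hxy, if_neg hOy]
        split_ifs with hcond
        · exact absurd hcond.1 hxy
        · push_cast; omega
    · rw [pvAns_append]
      have hbx : pvBest dp x = (i : Int) := by rw [← hb x, hcx]
      rw [hbx, ← hc, List.length_append, List.length_cons, hPlen, List.length_drop]
      split_ifs with hcond
      · exfalso; push_cast at hcond; omega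
      · push_cast; omega
  · -- append case: i = res.length, res' = res ++ [x]
    have hieq : i = res.length := le_antisymm hile (le_of_not_gt hlt)
    have hall : ∀ a ∈ res, a < x := by
      intro a ha
      refine hmemtake a ?_
      rwa [hieq, List.take_length]
    rw [if_neg hlt]
    refine ⟨?_, ?_, ?_⟩
    · rw [List.pairwise_append]
      exact ⟨hsort, List.pairwise_singleton _ _,
        fun a ha b hb => by rw [List.mem_singleton] at hb; exact hb ▸ hall a ha⟩
    · intro y
      have hbx : pvBest dp x = (i : Int) := by rw [← hb x, hcx]
      have hby : pvBest dp y = (pvCnt res y : Int) := (hb y).symm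
      have hnil : pvCnt ([] : List Int) y = 0 := by simp [pvCnt]
      rw [pvCnt_append, pvCnt_cons, pvBest_append, hbx, hby, hnil]
      by_cases hxy : x < y
      · have hCy : pvCnt res y = i := by
          rw [pvCnt_eq_len _ _ (fun a ha => lt_trans (hall a ha) hxy), hieq]
        simp only [if_pos hxy, hCy]
        split_ifs with hcond
        · push_cast; omega
        · exfalso; apply hcond; exact ⟨hxy, by omega⟩
      · simp only [if_neg hxy]
        split_ifs with hcond
        · exact absurd hcond.1 hxy
        · push_cast; omega
    · rw [pvAns_append]
      have hbx : pvBest dp x = (i : Int) := by rw [← hb x, hcx]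
      rw [hbx, ← hc, List.length_append, hieq]
      split_ifs with hcond
      · simp
      · exact (hcond (by omega)).elim

lemma pvMain (seq : List Int) (res : List Int) (dp : List (Int × Int)) (h : pvInv res dp) :
    pvInv (seq.foldl pvPatCore res) (seq.foldl pvDpStep dp) := by
  induction seq generalizing res dp with
  | nil => exact h
  | cons a t ih => exact ih _ _ (pvStep _ _ _ h)

lemma pvFuse (d : PySem.Dict Int Int) (arr : List Int) (res : List Int) :
    arr.foldl (pvPatStep d) res = (arr.filterMap (fun v => d.get? v)).foldl pvPatCore res := by
  induction arr generalizing res with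
  | nil => rfl
  | cons a t ih =>
    simp only [List.foldl_cons, List.filterMap_cons, pvPatStep]
    cases d.get? a <;> simp [ih]

-- ===== VERDICT (by name: the statement is the Claim_ definition above) =====
theorem calculate_cuts_spec : Claim_equal_calculate_cuts := by
  intro target arr _
  unfold Spec_calculate_cuts calculate_cuts calculate_cuts_alt
  have h0 : pvInv [] [] := by
    refine ⟨List.Pairwise.nil, fun y => by simp [pvCnt, pvBest], by simp [pvAns]⟩
  have h := pvMain (arr.filterMap (fun v => (pvIndexD target).get? v)) [] [] h0
  simp only []
  rw [pvFuse]
  rw [h.2.2]
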